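-- pv_equiv track=rewrite | github.com/millermeares/AdventOfCode | 2024/09/solve.py | find_leftmost_free_space
-- ===== SOURCE A (Python) =====
-- def find_leftmost_free_space(disk, size, start_search):
--   i = start_search - 1
--   while i < len(disk) - 1:
--     i += 1
--     if disk[i] != '.':
--       continue
--     # we are at left-most
--     end_idx = i
--     for j in range(i, len(disk)):
--       if disk[j] == '.':
--         end_idx = j
--       else:
--         break
--     empty_size = end_idx - i + 1
--     if empty_size >= size:
--       return (i, end_idx)
--     i = end_idx
--   return -1, -1
-- ===== SOURCE B (Python) =====
-- def find_leftmost_free_space(disk, size, start_search):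
--   n = len(disk)
--   run_start = None
--   for i in range(start_search, n):
--     if disk[i] == '.':
--       if run_start is None:
--         run_start = i
--     else:
--       if run_start is not None and i - run_start >= size:
--         return (run_start, i - 1)
--       run_start = None
--   if run_start is not None and n - run_start >= size:
--     return (run_start, n - 1)
--   return (-1, -1)
-- ===== Notes on version B (the rewrite author's own statement) =====
-- stated objective: simpler
-- what changed: Replaces A's nested loops (outer index walk plus an inner re-scan that measures each '.' run) by a single flat scan over range(start_search, len(disk)) that carries run_start and closes runs when a non-'.' cell or the end of the disk is reached.
import Mathlib
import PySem

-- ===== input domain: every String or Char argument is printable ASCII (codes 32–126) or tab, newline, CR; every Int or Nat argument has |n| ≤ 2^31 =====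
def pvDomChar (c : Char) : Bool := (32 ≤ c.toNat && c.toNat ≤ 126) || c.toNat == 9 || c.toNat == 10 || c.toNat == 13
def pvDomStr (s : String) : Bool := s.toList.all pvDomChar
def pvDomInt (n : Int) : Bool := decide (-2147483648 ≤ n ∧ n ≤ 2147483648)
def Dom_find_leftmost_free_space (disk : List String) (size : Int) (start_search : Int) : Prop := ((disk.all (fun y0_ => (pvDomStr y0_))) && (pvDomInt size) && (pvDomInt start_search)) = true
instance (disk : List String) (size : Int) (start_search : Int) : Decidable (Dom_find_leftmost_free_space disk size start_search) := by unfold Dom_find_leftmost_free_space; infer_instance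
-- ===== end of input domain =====

-- B replaces A's nested loops (outer scan + inner run re-scan) by a single flat scan
-- that maintains the start of the current '.' run; objective: simpler.

-- ===== PORT A =====
-- inner loop: `for j in range(i, len(disk)): if disk[j]=='.': end_idx = j else: break`
def pvA_run (disk : List String) : List Int → Int → Int
  | [], endIdx => endIdx
  | j :: rest, endIdx =>
    if PySem.List.pyGetD disk j "" == "." then pvA_run disk rest j else endIdx

-- outer `while i < len(disk)-1` loop; fuel bounds the iteration count (each step i grows by ≥ 1)
def pvA_loop (disk : List String) (size : Int) : Nat → Int → Int × Int
  | 0, _ => (-1, -1)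
  | fuel + 1, i =>
    if i < (disk.length : Int) - 1 then
      let i' := i + 1
      if PySem.List.pyGetD disk i' "" ≠ "." then
        pvA_loop disk size fuel i'
      else
        let endIdx := pvA_run disk (PySem.List.pyRange i' (disk.length : Int) 1) i'
        if size ≤ endIdx - i' + 1 then (i', endIdx)
        else pvA_loop disk size fuel endIdx
    else (-1, -1)

def find_leftmost_free_space (disk : List String) (size : Int) (start_search : Int) : Int × Int :=
  pvA_loop disk size ((disk.length : Int) - start_search).toNat (start_search - 1)

-- ===== PORT B =====
-- flat scan over `range(start_search, n)` carrying run_start : Option Int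
def pvB_loop (disk : List String) (size : Int) (n : Int) : List Int → Option Int → Int × Int
  | [], runStart =>
    match runStart with
    | some r => if size ≤ n - r then (r, n - 1) else (-1, -1)
    | none => (-1, -1)
  | i :: rest, runStart =>
    if PySem.List.pyGetD disk i "" == "." then
      pvB_loop disk size n rest (some (runStart.getD i))
    else
      match runStart with
      | some r => if size ≤ i - r then (r, i - 1) else pvB_loop disk size n rest none
      | none => pvB_loop disk size n rest none

def find_leftmost_free_space_alt (disk : List String) (size : Int) (start_search : Int) : Int × Int :=
  pvB_loop disk size (disk.length : Int)
    (PySem.List.pyRange start_search (disk.length : Int) 1) none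

-- ===== PRECONDITION & SPEC =====
-- Pre_ excludes exactly the inputs where A raises IndexError (start_search below -len(disk),
-- so disk[start_search] is out of range); B raises there too.
def Pre_find_leftmost_free_space (disk : List String) (size : Int) (start_search : Int) : Prop :=
  -(disk.length : Int) ≤ start_search
instance (disk : List String) (size : Int) (start_search : Int) : Decidable (Pre_find_leftmost_free_space disk size start_search) := by unfold Pre_find_leftmost_free_space; infer_instance

def pvWitness_find_leftmost_free_space : List String × Int × Int := (["1", ".", "."], 2, 0)

def Spec_find_leftmost_free_space (disk : List String) (size : Int) (start_search : Int) (out : Int × Int) : Prop := out = find_leftmost_free_space_alt disk size start_search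
instance (disk : List String) (size : Int) (start_search : Int) (out : Int × Int) : Decidable (Spec_find_leftmost_free_space disk size start_search out) := by unfold Spec_find_leftmost_free_space; infer_instance

-- ===== CLAIM (what is proved, stated in full; the proofs are below) =====
def Claim_equal_find_leftmost_free_space : Prop := ∀ (disk : List String) (size : Int) (start_search : Int), Dom_find_leftmost_free_space disk size start_search → Pre_find_leftmost_free_space disk size start_search → Spec_find_leftmost_free_space disk size start_search (find_leftmost_free_space disk size start_search)

-- ===== LEMMAS AND PROOFS =====

-- B's scan, once inside a '.' run that started at r, returns what A computes for that run:
-- either the run [r, e] is big enough and both report (r, e), or B continues past the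
-- index e+1 that closed the run — which is exactly where A's outer loop resumes.
theorem run_lemma (disk : List String) (size r : Int) :
    ∀ k p, p ≤ (disk.length : Int) → ((disk.length : Int) - p).toNat ≤ k →
      pvB_loop disk size (disk.length : Int) (PySem.List.pyRange p (disk.length : Int) 1) (some r) =
        (let e := pvA_run disk (PySem.List.pyRange p (disk.length : Int) 1) (p - 1);
         if size ≤ e - r + 1 then (r, e)
         else if e < (disk.length : Int) - 1 then
           pvB_loop disk size (disk.length : Int) (PySem.List.pyRange (e + 2) (disk.length : Int) 1) none
         else (-1, -1)) := by
  intro k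
  induction k with
  | zero =>
    intro p hpn hk
    have hp : p = (disk.length : Int) := by omega
    subst hp
    rw [PySem.List.pyRange_one_eq_nil le_rfl]
    simp only [pvA_run, pvB_loop]
    rw [show (disk.length : Int) - 1 - r + 1 = (disk.length : Int) - r by ring]
    split
    · rfl
    · rw [if_neg (show ¬ ((disk.length : Int) - 1 < (disk.length : Int) - 1) by omega)]
  | succ k ih =>
    intro p hpn hk
    rcases lt_or_eq_of_le hpn with hlt | heq
    · rw [PySem.List.pyRange_one_cons hlt]
      by_cases hdot : PySem.List.pyGetD disk p "" = "."
      · simp only [pvB_loop, pvA_run, hdot, beq_self_eq_true, if_pos, Option.getD_some]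
        have := ih (p + 1) (by omega) (by omega)
        simpa using this
      · have hne : (PySem.List.pyGetD disk p "" == ".") = false := by
          simp [hdot]
        simp only [pvB_loop, pvA_run, hne]
        simp only [Bool.false_eq_true, if_false]
        have h1 : p - 1 - r + 1 = p - r := by ring
        rw [h1]
        split
        · rfl
        · have h2 : p - 1 < (disk.length : Int) - 1 := by omega
          rw [if_pos h2]
          rw [show p - 1 + 2 = p + 1 by ring]
    · subst heq
      rw [PySem.List.pyRange_one_eq_nil le_rfl]
      simp only [pvA_run, pvB_loop]
      rw [show (disk.length : Int) - 1 - r + 1 = (disk.length : Int) - r by ring]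
      split
      · rfl
      · rw [if_neg (show ¬ ((disk.length : Int) - 1 < (disk.length : Int) - 1) by omega)]


-- bounds and break fact for the run end A's inner loop computes
theorem run_props (disk : List String) :
    ∀ k p, p ≤ (disk.length : Int) → ((disk.length : Int) - p).toNat ≤ k →
      p - 1 ≤ pvA_run disk (PySem.List.pyRange p (disk.length : Int) 1) (p - 1) ∧
      pvA_run disk (PySem.List.pyRange p (disk.length : Int) 1) (p - 1) ≤ (disk.length : Int) - 1 ∧
      (pvA_run disk (PySem.List.pyRange p (disk.length : Int) 1) (p - 1) + 1 < (disk.length : Int) →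
        PySem.List.pyGetD disk (pvA_run disk (PySem.List.pyRange p (disk.length : Int) 1) (p - 1) + 1) "" ≠ ".") := by
  intro k
  induction k with
  | zero =>
    intro p hpn hk
    have hp : p = (disk.length : Int) := by omega
    subst hp
    rw [PySem.List.pyRange_one_eq_nil le_rfl]
    simp only [pvA_run]
    refine ⟨le_rfl, by omega, ?_⟩
    intro h; omega
  | succ k ih =>
    intro p hpn hk
    rcases lt_or_eq_of_le hpn with hlt | heq
    · rw [PySem.List.pyRange_one_cons hlt]
      by_cases hdot : PySem.List.pyGetD disk p "" = "."
      · simp only [pvA_run, hdot, beq_self_eq_true, if_pos]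
        have := ih (p + 1) (by omega) (by omega)
        have hrw : p + 1 - 1 = p := by ring
        rw [hrw] at this
        exact ⟨by omega, this.2.1, this.2.2⟩
      · have hne : (PySem.List.pyGetD disk p "" == ".") = false := by simp [hdot]
        simp only [pvA_run, hne, Bool.false_eq_true, if_false]
        refine ⟨le_rfl, by omega, ?_⟩
        intro _
        have : p - 1 + 1 = p := by ring
        rw [this]; exact hdot
    · subst heq
      rw [PySem.List.pyRange_one_eq_nil le_rfl]
      simp only [pvA_run]
      refine ⟨le_rfl, by omega, ?_⟩
      intro h; omega

-- A's outer loop from i (about to test i+1) equals B's flat scan from i+1 with no open run.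
theorem main_lemma (disk : List String) (size : Int) :
    ∀ (fuel : Nat) (i : Int), (disk.length : Int) - 1 - i ≤ (fuel : Int) →
      pvA_loop disk size fuel i =
        pvB_loop disk size (disk.length : Int) (PySem.List.pyRange (i + 1) (disk.length : Int) 1) none := by
  intro fuel
  induction fuel with
  | zero =>
    intro i hi
    have : (disk.length : Int) ≤ i + 1 := by simpa using hi
    rw [PySem.List.pyRange_one_eq_nil this]
    simp [pvA_loop, pvB_loop]
  | succ fuel ih =>
    intro i hi
    by_cases hlt : i < (disk.length : Int) - 1
    · have hcons : i + 1 < (disk.length : Int) := by omega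
      rw [PySem.List.pyRange_one_cons hcons, show i + 1 + 1 = i + 2 by ring]
      by_cases hdot : PySem.List.pyGetD disk (i + 1) "" = "."
      · -- run starts at i+1
        have hrun := run_lemma disk size (i + 1) fuel (i + 2) (by omega) (by omega)
        have hA : pvA_loop disk size (fuel + 1) i =
            (let e := pvA_run disk (PySem.List.pyRange (i + 2) (disk.length : Int) 1) (i + 1);
             if size ≤ e - (i + 1) + 1 then (i + 1, e) else pvA_loop disk size fuel e) := by
          simp only [pvA_loop, if_pos hlt, hdot, ne_eq, not_true_eq_false, if_false]
          rw [PySem.List.pyRange_one_cons hcons]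
          simp only [pvA_run, hdot, beq_self_eq_true, if_pos]
          rw [show i + 1 + 1 = i + 2 by ring]
        rw [hA]
        have hB : pvB_loop disk size (disk.length : Int)
              ((i + 1) :: PySem.List.pyRange (i + 2) (disk.length : Int) 1) none =
            pvB_loop disk size (disk.length : Int)
              (PySem.List.pyRange (i + 2) (disk.length : Int) 1) (some (i + 1)) := by
          simp [pvB_loop, hdot]
        rw [hB, hrun]
        have he : i + 2 - 1 = i + 1 := by ring
        rw [he] at hrun ⊢
        set e := pvA_run disk (PySem.List.pyRange (i + 2) (disk.length : Int) 1) (i + 1) with hedef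
        have hprops := run_props disk ((disk.length : Int) - (i + 2)).toNat (i + 2) (by omega) (by omega)
        rw [show i + 2 - 1 = i + 1 by ring] at hprops
        simp only
        split
        · rfl
        · -- too small: A recurses from e, B continues from e+2 (or finishes)
          rw [ih e (by omega)]
          by_cases hend : e < (disk.length : Int) - 1
          · rw [if_pos hend]
            rw [PySem.List.pyRange_one_cons (show e + 1 < (disk.length : Int) by omega)]
            have hnd : PySem.List.pyGetD disk (e + 1) "" ≠ "." :=
              hprops.2.2 (by omega)
            simp [pvB_loop, hnd]
            rw [show e + 1 + 1 = e + 2 by ring]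
          · rw [if_neg hend]
            rw [PySem.List.pyRange_one_eq_nil (show (disk.length : Int) ≤ e + 1 by omega)]
            simp [pvB_loop]
      · -- not a dot: both skip
        have hA : pvA_loop disk size (fuel + 1) i = pvA_loop disk size fuel (i + 1) := by
          simp [pvA_loop, if_pos hlt, hdot]
        have hB : pvB_loop disk size (disk.length : Int)
              ((i + 1) :: PySem.List.pyRange (i + 2) (disk.length : Int) 1) none =
            pvB_loop disk size (disk.length : Int)
              (PySem.List.pyRange (i + 2) (disk.length : Int) 1) none := by
          simp [pvB_loop, hdot]
        rw [hA, hB, ih (i + 1) (by omega)]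
        have : i + 1 + 1 = i + 2 := by ring
        rw [this]
    · rw [PySem.List.pyRange_one_eq_nil (show (disk.length : Int) ≤ i + 1 by omega)]
      simp [pvA_loop, if_neg hlt, pvB_loop]

-- ===== VERDICT (by name: the statement is the Claim_ definition above) =====
theorem find_leftmost_free_space_spec : Claim_equal_find_leftmost_free_space := by
  intro disk size start_search _hdom hpre
  unfold Spec_find_leftmost_free_space find_leftmost_free_space find_leftmost_free_space_alt
  have := main_lemma disk size ((disk.length : Int) - start_search).toNat (start_search - 1)
    (by unfold Pre_find_leftmost_free_space at hpre; omega)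
  rw [this]
  have : start_search - 1 + 1 = start_search := by ring
  rw [this]
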